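-- pv_equiv track=rewrite | github.com/pierg/contracts-web | backend/operations/library.py | get_component
-- ===== SOURCE A (Python) =====
-- HEADER_SYMBOL = "**"
--
-- NAME_HEADER = "**NAME**"
--
-- COMPONENT_HEADER = "**COMPONENTS**"
--
-- COMMENT_CHAR = "#"
--
-- def get_component(file) -> list:
--     line_header = ""
--     component_list = []
--     for line in file:
--         line, header = _check_header(line)
--         if not line:
--             continue
--
--         if header:
--             if line == NAME_HEADER:
--                 if line_header == "":
--                     line_header = line
--                 else:
--                     Exception("File format not supported")
--             elif line == COMPONENT_HEADER:
--                 if line_header == NAME_HEADER: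
--                     line_header = line
--                 else:
--                     Exception("File format not supported")
--         else:
--             if line_header == COMPONENT_HEADER:
--                 component_list.append(line.strip())
--     return component_list
--
-- def _check_header(line: str) -> tuple[str, bool]:
--     """Returns a comment-free, tab-replaced line with no whitespace and the number of tabs"""
--     line = line.split(COMMENT_CHAR, 1)[0]
--     if line.startswith(HEADER_SYMBOL):
--         return line.strip(), True
--     return line.strip(), False
-- ===== SOURCE B (Python) =====
-- def _normalize(line):
--     """Same normalization as the original: drop comment, tag header by raw prefix, strip."""
--     raw = line.split("#", 1)[0]
--     return raw.strip(), raw.startswith("**")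
--
--
-- def get_component(file) -> list:
--     entries = [_normalize(line) for line in file]
--     try:
--         i = entries.index(("**NAME**", True))
--     except ValueError:
--         return []
--     rest = entries[i + 1:]
--     try:
--         j = rest.index(("**COMPONENTS**", True))
--     except ValueError:
--         return []
--     return [text for text, header in rest[j + 1:] if text and not header]
-- ===== Notes on version B (the rewrite author's own statement) =====
-- stated objective: simpler
-- what changed: A runs a three-state header state machine over the lines with a mutable line_header; B normalizes all lines once into (text,is_header) pairs, locates the first '**NAME**' header and the first '**COMPONENTS**' header after it by index search, and filters the tail slice, returning [] if either marker is missing.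
import Mathlib
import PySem

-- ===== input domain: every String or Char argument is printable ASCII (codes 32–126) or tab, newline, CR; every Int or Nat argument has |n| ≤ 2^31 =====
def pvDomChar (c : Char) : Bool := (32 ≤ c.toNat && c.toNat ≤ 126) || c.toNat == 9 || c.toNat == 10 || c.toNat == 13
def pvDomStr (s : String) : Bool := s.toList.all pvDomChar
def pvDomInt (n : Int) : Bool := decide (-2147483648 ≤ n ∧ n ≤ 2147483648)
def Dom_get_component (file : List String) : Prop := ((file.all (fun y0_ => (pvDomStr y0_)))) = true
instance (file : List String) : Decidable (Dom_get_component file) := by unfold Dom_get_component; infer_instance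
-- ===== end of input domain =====

-- B replaces A's three-state header state machine by a normalize-once, find-the-two-markers-then-filter-the-tail decomposition (objective: simpler).

-- ===== PORT A =====
-- _check_header: comment-free prefix, header iff the comment-free line starts with '**', then stripped.
def check_header (line : String) : String × Bool :=
  let line := ((PySem.Str.splitMax? line "#" 1).getD []).headD ""  -- line.split('#', 1)[0]; sep ≠ "" so split returns a nonempty list
  if PySem.Str.startswith line "**" then (PySem.Str.strip line, true)
  else (PySem.Str.strip line, false)

-- one iteration of A's for-loop: state = (line_header, component_list)
def stepA (st : String × List String) (line : String) : String × List String :=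
  let lh := check_header line
  let l := lh.1
  let h := lh.2
  if l = "" then st
  else if h = true then
    (if l = "**NAME**" then (if st.1 = "" then (l, st.2) else st)
     else if l = "**COMPONENTS**" then (if st.1 = "**NAME**" then (l, st.2) else st)
     else st)
  else if st.1 = "**COMPONENTS**" then (st.1, st.2 ++ [PySem.Str.strip l]) else st

def get_component (file : List String) : List String :=
  (file.foldl stepA ("", [])).2

-- ===== PORT B =====
def get_component_alt (file : List String) : List String :=
  let entries := file.map check_header
  match PySem.List.index? entries ("**NAME**", true) with
  | none => []
  | some i =>
    let rest := entries.drop (i + 1)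
    match PySem.List.index? rest ("**COMPONENTS**", true) with
    | none => []
    | some j => ((rest.drop (j + 1)).filter (fun e => decide (e.1 ≠ "") && !e.2)).map (·.1)

-- ===== PRECONDITION & SPEC =====
def Spec_get_component (file : List String) (out : List String) : Prop := out = get_component_alt file
instance (file : List String) (out : List String) : Decidable (Spec_get_component file out) := by unfold Spec_get_component; infer_instance

-- ===== CLAIM (what is proved, stated in full; the proofs are below) =====
def Claim_equal_get_component : Prop := ∀ (file : List String), Dom_get_component file → Spec_get_component file (get_component file)

-- ===== LEMMAS AND PROOFS =====

-- strip is idempotent (helpers for: A re-strips an already-stripped line before appending)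
theorem pv_dropWhile_eq_self_of_head (p : Char → Bool) (l : List Char)
    (h : ∀ x, l.head? = some x → p x = false) : List.dropWhile p l = l := by
  cases l with
  | nil => rfl
  | cons a as => rw [List.dropWhile_cons_of_neg]; simp [h a rfl]

theorem pv_getLast?_dropWhile (p : Char → Bool) (l : List Char) (h : List.dropWhile p l ≠ []) :
    (List.dropWhile p l).getLast? = l.getLast? := by
  rcases List.dropWhile_suffix (l := l) p with ⟨pre, hpre⟩
  conv_rhs => rw [← hpre]
  rw [List.getLast?_append, Option.or_of_isSome]
  rwa [Option.isSome_iff_ne_none, ne_eq, List.getLast?_eq_none_iff]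

theorem pv_chars_strip_idem (s : List Char) :
    PySem.Chars.strip (PySem.Chars.strip s) = PySem.Chars.strip s := by
  simp only [PySem.Chars.strip, PySem.Chars.lstrip, PySem.Chars.rstrip]
  set P := PySem.Chars.isspace
  set A := List.dropWhile P s with hA
  set B := List.dropWhile P A.reverse with hB
  have hBr : List.dropWhile P B.reverse = B.reverse := by
    apply pv_dropWhile_eq_self_of_head
    intro x hx
    rcases hBe : B with _ | ⟨b, bs⟩
    · rw [hBe] at hx; simp at hx
    · have hBne : B ≠ [] := by rw [hBe]; simp
      have h1 : B.getLast? = A.reverse.getLast? := pv_getLast?_dropWhile P A.reverse hBne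
      have h2 : A.reverse.getLast? = A.head? := by simp
      have hx' : A.head? = some x := by
        rw [← h2, ← h1, ← List.head?_reverse, hx]
      have := List.head?_dropWhile_not P s
      rw [← hA, hx'] at this
      simpa using this
  rw [hBr]
  simp only [hB, List.reverse_reverse, List.dropWhile_idempotent]

theorem pv_str_strip_idem (s : String) :
    PySem.Str.strip (PySem.Str.strip s) = PySem.Str.strip s := by
  have h := pv_chars_strip_idem s.toList
  apply String.ext
  simpa using h

theorem pv_check_header_strip (raw : String) :
    PySem.Str.strip (check_header raw).1 = (check_header raw).1 := by
  simp only [check_header]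
  split_ifs <;> exact pv_str_strip_idem _

-- B's tail collection, named for the proofs
def tailB (es : List (String × Bool)) : List String :=
  match PySem.List.index? es ("**COMPONENTS**", true) with
  | none => []
  | some j => ((es.drop (j + 1)).filter (fun e => decide (e.1 ≠ "") && !e.2)).map (·.1)

theorem pv_foldl_comp (file : List String) (acc : List String) :
    file.foldl stepA ("**COMPONENTS**", acc)
      = ("**COMPONENTS**",
         acc ++ ((file.map check_header).filter (fun e => decide (e.1 ≠ "") && !e.2)).map (·.1)) := by
  induction file generalizing acc with
  | nil => simp
  | cons a l ih =>
    rcases he : check_header a with ⟨t, h⟩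
    by_cases ht : t = ""
    · subst ht
      simp [stepA, he, ih]
    · cases h with
      | true =>
        have h1 : stepA ("**COMPONENTS**", acc) a = ("**COMPONENTS**", acc) := by
          simp only [stepA, he]
          simp [ht]
        simp only [List.foldl_cons, h1, ih, List.map_cons, List.filter_cons, he]
        simp [ht]
      | false =>
        have hs : PySem.Str.strip t = t := by
          have := pv_check_header_strip a; rwa [he] at this
        have h1 : stepA ("**COMPONENTS**", acc) a = ("**COMPONENTS**", acc ++ [t]) := by
          simp [stepA, he, ht, hs]
        simp only [List.foldl_cons, h1, ih, List.map_cons, List.filter_cons, he]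
        simp [ht]

theorem pv_foldl_name (file : List String) (acc : List String) :
    (file.foldl stepA ("**NAME**", acc)).2 = acc ++ tailB (file.map check_header) := by
  induction file generalizing acc with
  | nil => simp [tailB, PySem.List.index?]
  | cons a l ih =>
    rcases he : check_header a with ⟨t, h⟩
    by_cases hc : (t, h) = ("**COMPONENTS**", true)
    · rw [Prod.mk.injEq] at hc
      obtain ⟨ht, hh⟩ := hc
      subst ht; subst hh
      have h1 : stepA ("**NAME**", acc) a = ("**COMPONENTS**", acc) := by
        simp [stepA, he]
      simp only [List.foldl_cons, h1, pv_foldl_comp, tailB, List.map_cons, he]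
      rw [PySem.List.index?_cons_self]
      simp
    · have h1 : stepA ("**NAME**", acc) a = ("**NAME**", acc) := by
        simp only [stepA, he]
        split
        · rfl
        · split
          · split
            · simp_all
            · split
              · exfalso
                apply hc
                simp_all
              · rfl
          · simp_all
      simp only [List.foldl_cons, h1, ih, tailB, List.map_cons]
      rw [he, PySem.List.index?_cons_of_ne _ (by simpa using hc)]
      cases hidx : PySem.List.index? (l.map check_header) ("**COMPONENTS**", true) with
      | none => simp
      | some j => simp [List.drop_succ_cons]

theorem pv_foldl_empty (file : List String) (acc : List String) :
    (file.foldl stepA ("", acc)).2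
      = acc ++ (match PySem.List.index? (file.map check_header) ("**NAME**", true) with
                | none => []
                | some i => tailB ((file.map check_header).drop (i + 1))) := by
  induction file generalizing acc with
  | nil => simp [PySem.List.index?]
  | cons a l ih =>
    rcases he : check_header a with ⟨t, h⟩
    by_cases hc : (t, h) = ("**NAME**", true)
    · rw [Prod.mk.injEq] at hc
      obtain ⟨ht, hh⟩ := hc
      subst ht; subst hh
      have h1 : stepA ("", acc) a = ("**NAME**", acc) := by
        simp [stepA, he]
      simp only [List.foldl_cons, h1, pv_foldl_name, List.map_cons, he]
      rw [PySem.List.index?_cons_self]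
      simp
    · have h1 : stepA ("", acc) a = ("", acc) := by
        simp only [stepA, he]
        split
        · rfl
        · split
          · split
            · exfalso
              apply hc
              simp_all
            · split
              · simp_all
              · rfl
          · simp_all
      simp only [List.foldl_cons, h1, ih, List.map_cons]
      rw [he, PySem.List.index?_cons_of_ne _ (by simpa using hc)]
      cases hidx : PySem.List.index? (l.map check_header) ("**NAME**", true) with
      | none => simp
      | some i => simp [List.drop_succ_cons]

-- ===== VERDICT (by name: the statement is the Claim_ definition above) =====
theorem get_component_spec : Claim_equal_get_component := by
  intro file _
  unfold Spec_get_component get_component get_component_alt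
  rw [pv_foldl_empty, List.nil_append]
  unfold tailB
  rfl
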